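-- pv_equiv track=rewrite | github.com/alexandraback/datacollection | solutions_5686313294495744_0/Python/MattStark/main.py | solve
-- ===== SOURCE A (Python) =====
-- def solve(values, firstdups, seconddups):
--     high = 0
--     for i in range(2**len(values)):
--         bmask = bin(i)[2:].zfill(len(values))
--         firstreal = set()
--         secondreal = set()
--         [(firstreal.add(first), secondreal.add(second)) for real, (first, second) in zip(bmask, values) if real == "1"]
--         if not [1 for real, (first, second) in zip(bmask, values) if real == "0" and not (first in firstreal and second in secondreal)]:
--             # found a duplicate which can't be a duplicate
--             high = max(high, bmask.count("0"))
--     return high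
--
--
--     return high
--
--     if values[0][0] in firstdups and values[0][1] in seconddups:
--         # duplicate
--         return solve(values[1:], firstdups, seconddups) + 1
--     else:
--         newfirstdups = firstdups.copy()
--         newseconddups = seconddups.copy()
--         newfirstdups.add(values[0][0])
--         newseconddups.add(values[0][1])
--         return solve(values[1:], newfirstdups, newseconddups)
-- ===== SOURCE B (Python) =====
-- def solve(values, firstdups, seconddups):
--     def best(items, dups, firsts, seconds):
--         if not items:
--             if all(f in firsts and s in seconds for f, s in dups):
--                 return len(dups)
--             return 0
--         (f, s), rest = items[0], items[1:]
--         as_dup = best(rest, dups + [(f, s)], firsts, seconds)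
--         as_real = best(rest, dups, firsts | {f}, seconds | {s})
--         return max(as_dup, as_real)
--     return best(values, [], set(), set())
-- ===== Notes on version B (the rewrite author's own statement) =====
-- stated objective: alternative
-- what changed: Replaces A's 2**n loop over binary-string bitmasks (building each mask with bin/zfill and re-scanning it with zip) by a recursive dup/real backtracking over the list that carries the chosen-duplicates list and incrementally built real-value sets, combining branches with max.
-- intended difference: On values = [] A returns 1 (bin(0).zfill(0) still yields the one-character mask '0' so an inexistent item is counted), while B returns 0, the correct maximum number of removable duplicates of an empty list. — e.g. on solve([], [], []): A returns 1, B returns 0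
import Mathlib
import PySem

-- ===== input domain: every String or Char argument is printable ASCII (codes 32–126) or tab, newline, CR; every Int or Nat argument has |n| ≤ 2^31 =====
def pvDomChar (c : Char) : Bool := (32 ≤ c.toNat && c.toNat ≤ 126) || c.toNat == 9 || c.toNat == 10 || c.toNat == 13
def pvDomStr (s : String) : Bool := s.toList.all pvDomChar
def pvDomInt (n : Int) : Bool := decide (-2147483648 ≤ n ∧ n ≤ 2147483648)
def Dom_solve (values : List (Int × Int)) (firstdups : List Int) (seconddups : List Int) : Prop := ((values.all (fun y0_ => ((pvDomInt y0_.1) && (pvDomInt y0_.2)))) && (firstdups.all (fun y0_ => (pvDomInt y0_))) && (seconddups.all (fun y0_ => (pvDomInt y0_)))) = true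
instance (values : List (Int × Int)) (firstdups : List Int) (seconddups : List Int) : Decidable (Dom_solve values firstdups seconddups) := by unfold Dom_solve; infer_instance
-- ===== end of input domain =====

-- B replaces A's 2**n bitmask-string enumeration with a recursive dup/real backtracking over the
-- list carrying incremental real-value sets (objective: alternative decomposition, same cost class).

-- ===== PORT A =====
-- bin(i)[2:] for i ≥ 1: binary digits, most significant first (Python's bin is a builtin;
-- ported by hand as the standard repeated-halving construction, exact for Nat arguments)
def goBin (i : Nat) : List Char :=
  if h : i = 0 then []
  else goBin (i / 2) ++ [if i % 2 == 1 then '1' else '0']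
termination_by i
decreasing_by exact Nat.div_lt_self (Nat.pos_of_ne_zero h) (by norm_num)

-- bin(i)[2:], including bin(0)[2:] = "0"
def pyBin (i : Nat) : List Char := if i = 0 then ['0'] else goBin i

-- str.zfill (never truncates)
def zfill (n : Nat) (s : List Char) : List Char := List.replicate (n - s.length) '0' ++ s

def solve (values : List (Int × Int)) (firstdups : List Int) (seconddups : List Int) : Int :=
  (List.range (2 ^ values.length)).foldl (fun high i =>
    let bmask := zfill values.length (pyBin i)
    let reals := (bmask.zip values).foldl
      (fun (p : PySem.Set Int × PySem.Set Int) q =>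
        if q.1 == '1' then (PySem.Set.add p.1 q.2.1, PySem.Set.add p.2 q.2.2) else p)
      (PySem.Set.empty, PySem.Set.empty)
    let bad := ((bmask.zip values).filter
      (fun q => q.1 == '0' &&
        !(PySem.Set.contains reals.1 q.2.1 && PySem.Set.contains reals.2 q.2.2))).map
      (fun _ => (1 : Int))
    if bad = [] then max high ((bmask.count '0' : Nat) : Int) else high) 0

-- ===== PORT B =====
def bestB (items : List (Int × Int)) (dups : List (Int × Int))
    (firsts seconds : PySem.Set Int) : Int :=
  match items with
  | [] =>
    if dups.all (fun d => PySem.Set.contains firsts d.1 && PySem.Set.contains seconds d.2)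
    then (dups.length : Int) else 0
  | (f, s) :: rest =>
    max (bestB rest (dups ++ [(f, s)]) firsts seconds)
        (bestB rest dups (PySem.Set.union firsts (PySem.Set.ofList [f]))
                         (PySem.Set.union seconds (PySem.Set.ofList [s])))

def solve_alt (values : List (Int × Int)) (firstdups : List Int) (seconddups : List Int) : Int :=
  bestB values [] PySem.Set.empty PySem.Set.empty

-- ===== PRECONDITION & SPEC =====
-- On values = [] A returns 1 (bin(0) pads to the 1-char mask "0" even though there is no item),
-- but the maximum number of items markable as duplicates of an empty list is 0, which B returns.
def D_solve (values : List (Int × Int)) (firstdups : List Int) (seconddups : List Int) : Prop :=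
  values = []
instance (values : List (Int × Int)) (firstdups : List Int) (seconddups : List Int) :
    Decidable (D_solve values firstdups seconddups) := by unfold D_solve; infer_instance

def Spec_solve (values : List (Int × Int)) (firstdups : List Int) (seconddups : List Int)
    (out : Int) : Prop :=
  ¬ D_solve values firstdups seconddups → out = solve_alt values firstdups seconddups
instance (values : List (Int × Int)) (firstdups : List Int) (seconddups : List Int) (out : Int) :
    Decidable (Spec_solve values firstdups seconddups out) := by unfold Spec_solve; infer_instance

def pvDiffWitness_solve : (List (Int × Int)) × List Int × List Int := ([], [], [])
def pvDiffWitnessOut_solve : Int × Int := (1, 0)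

-- ===== CLAIM (what is proved, stated in full; the proofs are below) =====
def Claim_unchanged_solve : Prop := ∀ (values : List (Int × Int)) (firstdups : List Int) (seconddups : List Int), Dom_solve values firstdups seconddups → Spec_solve values firstdups seconddups (solve values firstdups seconddups)
def Claim_changed_solve : Prop := Dom_solve (pvDiffWitness_solve.1) (pvDiffWitness_solve.2.1) (pvDiffWitness_solve.2.2) ∧ D_solve (pvDiffWitness_solve.1) (pvDiffWitness_solve.2.1) (pvDiffWitness_solve.2.2) ∧ solve (pvDiffWitness_solve.1) (pvDiffWitness_solve.2.1) (pvDiffWitness_solve.2.2) = pvDiffWitnessOut_solve.1 ∧ solve_alt (pvDiffWitness_solve.1) (pvDiffWitness_solve.2.1) (pvDiffWitness_solve.2.2) = pvDiffWitnessOut_solve.2 ∧ pvDiffWitnessOut_solve.1 ≠ pvDiffWitnessOut_solve.2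
def Claim_exact_solve : Prop := ∀ (values : List (Int × Int)) (firstdups : List Int) (seconddups : List Int), Dom_solve values firstdups seconddups → D_solve values firstdups seconddups → solve values firstdups seconddups ≠ solve_alt values firstdups seconddups

-- ===== LEMMAS AND PROOFS =====

-- all bit-strings of length n, in the numeric order bin(0..2^n-1) produces ('0' first)
def masksC : Nat → List (List Char)
  | 0 => [[]]
  | n + 1 => (masksC n).map (fun m => '0' :: m) ++ (masksC n).map (fun m => '1' :: m)

def pad (n i : Nat) : List Char := List.replicate (n - (goBin i).length) '0' ++ goBin i

-- the items of `items` marked dup / the first and second components of the items marked real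
def dupsOf (m : List Char) (items : List (Int × Int)) : List (Int × Int) :=
  ((m.zip items).filter (fun q => q.1 == '0')).map Prod.snd
def firstsOf (m : List Char) (items : List (Int × Int)) : List Int :=
  ((m.zip items).filter (fun q => q.1 == '1')).map (fun q => q.2.1)
def secondsOf (m : List Char) (items : List (Int × Int)) : List Int :=
  ((m.zip items).filter (fun q => q.1 == '1')).map (fun q => q.2.2)

-- leaf value of the decision tree: dup count if all dups are covered by the reals, else 0
def score (m : List Char) (items dups : List (Int × Int)) (f s : PySem.Set Int) : Int :=
  if (dups ++ dupsOf m items).all (fun d =>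
      PySem.Set.contains ((firstsOf m items).foldl PySem.Set.add f) d.1 &&
      PySem.Set.contains ((secondsOf m items).foldl PySem.Set.add s) d.2)
  then ((dups ++ dupsOf m items).length : Int) else 0

theorem goBin_zero : goBin 0 = [] := by unfold goBin; simp

theorem goBin_ne_zero (i : Nat) (h : i ≠ 0) :
    goBin i = goBin (i / 2) ++ [if i % 2 == 1 then '1' else '0'] := by
  conv_lhs => rw [goBin]
  simp [h]

theorem div2_lt (i n : Nat) (h : i < 2 ^ (n + 1)) : i / 2 < 2 ^ n := by
  have h2 : i < 2 ^ n * 2 := by rw [← pow_succ]; exact h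
  omega

theorem goBin_len_le : ∀ n i, i < 2 ^ n → (goBin i).length ≤ n := by
  intro n
  induction n with
  | zero => intro i h; interval_cases i; simp [goBin_zero]
  | succ n ih =>
    intro i h
    by_cases h0 : i = 0
    · simp [h0, goBin_zero]
    · rw [goBin_ne_zero i h0]
      have : i / 2 < 2 ^ n := div2_lt i n h
      have := ih _ this
      simp [List.length_append]; omega

theorem pad_step (n j : Nat) (h : j < 2 ^ (n + 1)) :
    pad (n + 1) j = pad n (j / 2) ++ [if j % 2 == 1 then '1' else '0'] := by
  by_cases h0 : j = 0
  · subst h0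
    simp [pad, goBin_zero, List.replicate_succ' (n := n)]
  · have hj2 : j / 2 < 2 ^ n := div2_lt j n h
    have hlen : (goBin (j / 2)).length ≤ n := goBin_len_le n _ hj2
    rw [pad, pad, goBin_ne_zero j h0]
    rw [List.length_append]
    have : n + 1 - ((goBin (j / 2)).length + 1) = n - (goBin (j / 2)).length := by omega
    rw [List.length_singleton, this, List.append_assoc]

theorem goBin_pow_add : ∀ n j, j < 2 ^ n → goBin (2 ^ n + j) = '1' :: pad n j := by
  intro n
  induction n with
  | zero =>
    intro j h; interval_cases j
    simp [goBin_ne_zero 1 (by norm_num), goBin_zero, pad]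
  | succ n ih =>
    intro j h
    have hne : 2 ^ (n + 1) + j ≠ 0 := by positivity
    rw [goBin_ne_zero _ hne]
    have hdiv : (2 ^ (n + 1) + j) / 2 = 2 ^ n + j / 2 := by
      rw [Nat.pow_succ]
      omega
    have hmod : (2 ^ (n + 1) + j) % 2 = j % 2 := by
      rw [Nat.pow_succ]
      omega
    have hj2 : j / 2 < 2 ^ n := div2_lt j n h
    rw [hdiv, hmod, ih _ hj2, pad_step n j h]
    simp

theorem zfill_pyBin_eq_pad (n i : Nat) (h : 1 ≤ n) : zfill n (pyBin i) = pad n i := by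
  by_cases h0 : i = 0
  · subst h0
    simp only [pyBin, pad, goBin_zero]
    simp [zfill]
    obtain ⟨m, rfl⟩ : ∃ m, n = m + 1 := ⟨n - 1, by omega⟩
    simp [List.replicate_succ' (n := m)]
  · simp [pyBin, h0, zfill, pad]

theorem pad_cons_zero (n i : Nat) (h : i < 2 ^ n) : pad (n + 1) i = '0' :: pad n i := by
  have hlen : (goBin i).length ≤ n := goBin_len_le n i h
  rw [pad, pad]
  have : n + 1 - (goBin i).length = (n - (goBin i).length) + 1 := by omega
  rw [this, List.replicate_succ]
  rfl

theorem goBin_len_eq (n j : Nat) (h : j < 2 ^ n) : (goBin (2 ^ n + j)).length = n + 1 := by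
  rw [goBin_pow_add n j h]
  have : (goBin j).length ≤ n := goBin_len_le n j h
  simp [pad]
  omega

theorem pad_pow_add (n j : Nat) (h : j < 2 ^ n) : pad (n + 1) (2 ^ n + j) = '1' :: pad n j := by
  rw [pad, goBin_len_eq n j h, Nat.sub_self, List.replicate_zero, List.nil_append,
    goBin_pow_add n j h]

theorem masks_eq : ∀ n, (List.range (2 ^ (n + 1))).map (fun i => zfill (n + 1) (pyBin i)) = masksC (n + 1) := by
  intro n
  induction n with
  | zero =>
    have : (2 : Nat) ^ 1 = 2 := by norm_num
    rw [this]
    simp [List.range_succ, zfill, pyBin, goBin_ne_zero 1 (by norm_num), goBin_zero, masksC]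
  | succ n ih =>
    have hsplit : (2 : Nat) ^ (n + 2) = 2 ^ (n + 1) + 2 ^ (n + 1) := by ring
    rw [hsplit, List.range_add, List.map_append, List.map_map]
    show _ = (masksC (n + 1)).map (fun m => '0' :: m) ++ (masksC (n + 1)).map (fun m => '1' :: m)
    congr 1
    · -- low half: leading '0'
      rw [← ih, List.map_map]
      apply List.map_congr_left
      intro i hi
      have hi' : i < 2 ^ (n + 1) := List.mem_range.mp hi
      simp only [Function.comp_apply]
      rw [zfill_pyBin_eq_pad _ _ (by omega), zfill_pyBin_eq_pad _ _ (by omega),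
        pad_cons_zero _ _ hi']
    · -- high half: leading '1'
      rw [← ih, List.map_map]
      apply List.map_congr_left
      intro j hj
      have hj' : j < 2 ^ (n + 1) := List.mem_range.mp hj
      simp only [Function.comp_apply]
      rw [zfill_pyBin_eq_pad _ _ (by omega), zfill_pyBin_eq_pad _ _ (by omega)]
      exact pad_pow_add (n + 1) j hj'

theorem score_nonneg (m : List Char) (items dups : List (Int × Int)) (f s : PySem.Set Int) :
    0 ≤ score m items dups f s := by
  unfold score
  split <;> positivity

theorem foldl_max_split {γ : Type} (g : γ → Int) :
    ∀ (l : List γ) (v w : Int),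
      l.foldl (fun a x => max a (g x)) (max v w) = max v (l.foldl (fun a x => max a (g x)) w) := by
  intro l
  induction l with
  | nil => intro v w; rfl
  | cons x t ih =>
    intro v w
    simp only [List.foldl_cons, max_assoc]
    exact ih v (max w (g x))

theorem foldl_max_nonneg {γ : Type} (g : γ → Int) (l : List γ) (v : Int) (h : 0 ≤ v) :
    0 ≤ l.foldl (fun a x => max a (g x)) v :=
  le_trans h (PySem.List.le_foldl_max_int l g v).1

theorem filter_zip_cons (c c' : Char) (x y : Int) (m : List Char) (rest : List (Int × Int)) :
    List.filter (fun q => q.1 == c') ((c, (x, y)) :: m.zip rest)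
      = if c == c' then ((c, (x, y)) :: List.filter (fun q => q.1 == c') (m.zip rest))
        else List.filter (fun q => q.1 == c') (m.zip rest) := by
  rw [List.filter_cons]

theorem score_cons_zero (m : List Char) (x y : Int) (rest dups : List (Int × Int))
    (f s : PySem.Set Int) :
    score ('0' :: m) ((x, y) :: rest) dups f s = score m rest (dups ++ [(x, y)]) f s := by
  unfold score dupsOf firstsOf secondsOf
  rw [List.zip_cons_cons, filter_zip_cons, filter_zip_cons]
  simp only [show (('0' : Char) == '0') = true from rfl,
    show (('0' : Char) == '1') = false from rfl,
    if_true, List.map_cons, List.append_assoc, List.singleton_append]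
  simp

theorem score_cons_one (m : List Char) (x y : Int) (rest dups : List (Int × Int))
    (f s : PySem.Set Int) :
    score ('1' :: m) ((x, y) :: rest) dups f s
      = score m rest dups (PySem.Set.add f x) (PySem.Set.add s y) := by
  unfold score dupsOf firstsOf secondsOf
  rw [List.zip_cons_cons, filter_zip_cons, filter_zip_cons]
  simp

theorem bestB_eq : ∀ (items dups : List (Int × Int)) (f s : PySem.Set Int),
    bestB items dups f s
      = (masksC items.length).foldl (fun a m => max a (score m items dups f s)) 0 := by
  intro items
  induction items with
  | nil =>
    intro dups f s
    have h := score_nonneg [] [] dups f s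
    simp only [List.length_nil, masksC, List.foldl_cons, List.foldl_nil]
    rw [max_eq_right h]
    show bestB [] dups f s = score [] [] dups f s
    unfold bestB score dupsOf firstsOf secondsOf
    conv_rhs => rw [show ((([] : List Char).zip ([] : List (Int × Int))) : List (Char × (Int × Int))) = [] from rfl]
    conv_rhs => rw [List.filter_nil, List.filter_nil, List.map_nil, List.map_nil, List.map_nil,
      List.append_nil, List.foldl_nil, List.foldl_nil]
  | cons v rest ih =>
    obtain ⟨x, y⟩ := v
    intro dups f s
    have e0 : (masksC rest.length).foldl
        (fun a m => max a (score ('0' :: m) ((x, y) :: rest) dups f s)) 0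
        = bestB rest (dups ++ [(x, y)]) f s := by
      rw [ih]
      exact PySem.List.foldl_congr_mem _ _ _ _ (fun acc m _ => by rw [score_cons_zero])
    have e1 : (masksC rest.length).foldl
        (fun a m => max a (score ('1' :: m) ((x, y) :: rest) dups f s)) 0
        = bestB rest dups (PySem.Set.add f x) (PySem.Set.add s y) := by
      rw [ih]
      exact PySem.List.foldl_congr_mem _ _ _ _ (fun acc m _ => by rw [score_cons_one])
    have hnn : 0 ≤ (masksC rest.length).foldl
        (fun a m => max a (score ('0' :: m) ((x, y) :: rest) dups f s)) 0 :=
      foldl_max_nonneg _ _ _ le_rfl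
    simp only [List.length_cons, masksC, List.foldl_append, List.foldl_map]
    conv_rhs => rw [show (masksC rest.length).foldl
        (fun a m => max a (score ('0' :: m) ((x, y) :: rest) dups f s)) 0
      = max ((masksC rest.length).foldl
        (fun a m => max a (score ('0' :: m) ((x, y) :: rest) dups f s)) 0) 0
      from (max_eq_left hnn).symm]
    rw [foldl_max_split, e0, e1]
    rfl

-- A's per-mask pair of real sets equals the two separate set folds of `score`
theorem pairfold_eq (l : List (Char × (Int × Int))) :
    ∀ (F S : PySem.Set Int),
      l.foldl (fun (p : PySem.Set Int × PySem.Set Int) q =>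
          if q.1 == '1' then (PySem.Set.add p.1 q.2.1, PySem.Set.add p.2 q.2.2) else p) (F, S)
        = (((l.filter (fun q => q.1 == '1')).map (fun q => q.2.1)).foldl PySem.Set.add F,
           ((l.filter (fun q => q.1 == '1')).map (fun q => q.2.2)).foldl PySem.Set.add S) := by
  induction l with
  | nil => intro F S; rfl
  | cons q t ih =>
    intro F S
    rw [List.foldl_cons, List.filter_cons]
    by_cases h : q.1 == '1'
    · rw [if_pos h, if_pos h, List.map_cons, List.foldl_cons, List.map_cons, List.foldl_cons]
      exact ih _ _
    · rw [if_neg h, if_neg h]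
      exact ih F S

-- the bad-list is empty iff every dup is covered
theorem badlist_iff (l : List (Char × (Int × Int))) (c : Int × Int → Bool) :
    ((l.filter (fun q => q.1 == '0' && !(c q.2))).map (fun _ => (1 : Int)) = []
      ↔ ((l.filter (fun q => q.1 == '0')).map Prod.snd).all c = true) := by
  induction l with
  | nil => simp
  | cons q t ih =>
    rw [List.filter_cons, List.filter_cons]
    by_cases h0 : q.1 == '0'
    · by_cases hc : c q.2
      · have hb : (q.1 == '0' && !c q.2) = false := by simp [hc]
        rw [if_neg (by simp [hb]), if_pos h0, List.map_cons, List.all_cons, hc]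
        simpa using ih
      · have hb : (q.1 == '0' && !c q.2) = true := by simp [h0, hc]
        rw [if_pos hb, if_pos h0, List.map_cons, List.map_cons, List.all_cons]
        simp [hc]
    · have hb : (q.1 == '0' && !c q.2) = false := by simp [h0]
      rw [if_neg (by simp [hb]), if_neg h0]
      exact ih

theorem count_zero_eq (m : List Char) :
    ∀ (vs : List (Int × Int)), m.length = vs.length →
      m.count '0' = ((m.zip vs).filter (fun q => q.1 == '0')).length := by
  induction m with
  | nil => intro vs _; simp
  | cons c t ih =>
    intro vs hlen
    cases vs with
    | nil => simp at hlen
    | cons v vs' =>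
      simp only [List.length_cons] at hlen
      by_cases h : c == '0'
      · have hc : c = '0' := by simpa using h
        simp [List.zip_cons_cons, List.filter_cons, hc, ih vs' (by omega)]
      · have hc : ¬ c = '0' := by simpa using h
        simp [List.zip_cons_cons, h, hc, ih vs' (by omega)]

-- A's loop body, with the let-bindings zeta-expanded (definitionally equal to solve's body)
def stepA (values : List (Int × Int)) (high : Int) (m : List Char) : Int :=
  if ((m.zip values).filter
      (fun q => q.1 == '0' &&
        !(PySem.Set.contains ((m.zip values).foldl
            (fun (p : PySem.Set Int × PySem.Set Int) q =>
              if q.1 == '1' then (PySem.Set.add p.1 q.2.1, PySem.Set.add p.2 q.2.2) else p)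
            (PySem.Set.empty, PySem.Set.empty)).1 q.2.1 &&
          PySem.Set.contains ((m.zip values).foldl
            (fun (p : PySem.Set Int × PySem.Set Int) q =>
              if q.1 == '1' then (PySem.Set.add p.1 q.2.1, PySem.Set.add p.2 q.2.2) else p)
            (PySem.Set.empty, PySem.Set.empty)).2 q.2.2))).map (fun _ => (1 : Int)) = []
  then max high ((m.count '0' : Nat) : Int) else high

theorem solve_eq_foldl (values : List (Int × Int)) (fd sd : List Int) :
    solve values fd sd
      = (List.range (2 ^ values.length)).foldl
          (fun high i => stepA values high (zfill values.length (pyBin i))) 0 := rfl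

-- A's per-mask step is `max high (score m values [] ∅ ∅)` (for masks of the right length)
theorem stepA_eq_score (values : List (Int × Int)) (m : List Char)
    (hlen : m.length = values.length) (high : Int) (hnn : 0 ≤ high) :
    stepA values high m = max high (score m values [] PySem.Set.empty PySem.Set.empty) := by
  unfold stepA
  rw [pairfold_eq]
  dsimp only
  simp only [score, dupsOf, firstsOf, secondsOf, List.nil_append]
  set f' := (((m.zip values).filter (fun q => q.1 == '1')).map (fun q => q.2.1)).foldl
    PySem.Set.add PySem.Set.empty with hf'
  set s' := (((m.zip values).filter (fun q => q.1 == '1')).map (fun q => q.2.2)).foldl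
    PySem.Set.add PySem.Set.empty with hs'
  have hiff := badlist_iff (m.zip values)
    (fun d => PySem.Set.contains f' d.1 && PySem.Set.contains s' d.2)
  by_cases hall : (((m.zip values).filter (fun q => q.1 == '0')).map Prod.snd).all
      (fun d => PySem.Set.contains f' d.1 && PySem.Set.contains s' d.2) = true
  · rw [if_pos (hiff.mpr hall), if_pos hall]
    rw [count_zero_eq m values hlen]
    simp
  · rw [if_neg (fun h => hall (hiff.mp h)), if_neg hall]
    omega

theorem foldl_stepA_eq (values : List (Int × Int)) (l : List (List Char))
    (hl : ∀ m ∈ l, m.length = values.length) :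
    ∀ (v : Int), 0 ≤ v →
      l.foldl (fun high m => stepA values high m) v
        = l.foldl (fun a m => max a (score m values [] PySem.Set.empty PySem.Set.empty)) v := by
  induction l with
  | nil => intro v _; rfl
  | cons m t ih =>
    intro v hv
    simp only [List.foldl_cons]
    rw [stepA_eq_score values m (hl m List.mem_cons_self) v hv]
    exact ih (fun x hx => hl x (List.mem_cons_of_mem _ hx)) _ (le_trans hv (le_max_left _ _))

theorem masksC_len : ∀ n, ∀ m ∈ masksC n, m.length = n := by
  intro n
  induction n with
  | zero => intro m hm; simp [masksC] at hm; simp [hm]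
  | succ n ih =>
    intro m hm
    simp only [masksC, List.mem_append, List.mem_map] at hm
    rcases hm with ⟨m', hm', rfl⟩ | ⟨m', hm', rfl⟩ <;> simp [ih m' hm']

-- ===== VERDICT (by name: the statement is the Claim_ definition above) =====
theorem solve_spec : Claim_unchanged_solve := by
  intro values firstdups seconddups _ hD
  cases values with
  | nil => exact absurd rfl hD
  | cons v vs =>
    show solve (v :: vs) firstdups seconddups = solve_alt (v :: vs) firstdups seconddups
    rw [solve_eq_foldl]
    have hmaps : (List.range (2 ^ (v :: vs).length)).map
        (fun i => zfill (v :: vs).length (pyBin i)) = masksC (v :: vs).length := masks_eq vs.length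
    have h1 : (List.range (2 ^ (v :: vs).length)).foldl
        (fun high i => stepA (v :: vs) high (zfill (v :: vs).length (pyBin i))) 0
        = ((List.range (2 ^ (v :: vs).length)).map
            (fun i => zfill (v :: vs).length (pyBin i))).foldl
            (fun high m => stepA (v :: vs) high m) 0 := by
      rw [List.foldl_map]
    rw [h1, hmaps, foldl_stepA_eq (v :: vs) (masksC (v :: vs).length)
      (fun m hm => masksC_len _ m hm) 0 le_rfl]
    show _ = solve_alt (v :: vs) firstdups seconddups
    unfold solve_alt
    rw [bestB_eq]

theorem solve_changed : Claim_changed_solve := by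
  unfold Claim_changed_solve; decide

theorem solve_tight : Claim_exact_solve := by
  intro values firstdups seconddups _ hD
  have hv : values = [] := hD
  subst hv
  have h1 : solve [] firstdups seconddups = 1 := rfl
  have h2 : solve_alt [] firstdups seconddups = 0 := rfl
  rw [h1, h2]
  norm_num
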